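-- pv_equiv track=rewrite | github.com/luta-wolf/pre-interview_tests | Kaspersky/phase2/heroes.py | check_mission
-- ===== SOURCE A (Python) =====
-- import itertools
--
-- def check_mission(heroes, mission):
-- 	hero_list = []
-- 	for stage in mission:
-- 		available_hero = []
-- 		for hero in heroes:
-- 			if stage in hero[1]:
-- 				available_hero.append(hero[0])
-- 		if len(available_hero):
-- 			hero_list.append(tuple(available_hero))
-- 		else:
-- 			return tuple([])
--
-- 	combinations = list(itertools.product(*hero_list))
-- 	for combination in combinations:
-- 		if len(set(combination)) == len(mission):
-- 			return(combination)
-- 	return tuple([])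
-- ===== SOURCE B (Python) =====
-- def check_mission(heroes, mission):
--     # candidate heroes per stage, in heroes order
--     stages = [[name for name, skills in heroes if stage in skills] for stage in mission]
--
--     def dfs(i, used):
--         if i == len(stages):
--             return ()
--         for c in stages[i]:
--             if c not in used:
--                 used.add(c)
--                 rest = dfs(i + 1, used)
--                 used.discard(c)
--                 if rest is not None:
--                     return (c,) + rest
--         return None
--
--     result = dfs(0, set())
--     return result if result is not None else tuple([])
-- ===== Notes on version B (the rewrite author's own statement) =====
-- stated objective: alternative
-- what changed: Replaces materializing the full itertools.product of candidate tuples and scanning it for the first all-distinct one with a backtracking depth-first search that prunes any prefix reusing a hero, returning the same lexicographically-first distinct assignment without ever building the cartesian product.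
import Mathlib
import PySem

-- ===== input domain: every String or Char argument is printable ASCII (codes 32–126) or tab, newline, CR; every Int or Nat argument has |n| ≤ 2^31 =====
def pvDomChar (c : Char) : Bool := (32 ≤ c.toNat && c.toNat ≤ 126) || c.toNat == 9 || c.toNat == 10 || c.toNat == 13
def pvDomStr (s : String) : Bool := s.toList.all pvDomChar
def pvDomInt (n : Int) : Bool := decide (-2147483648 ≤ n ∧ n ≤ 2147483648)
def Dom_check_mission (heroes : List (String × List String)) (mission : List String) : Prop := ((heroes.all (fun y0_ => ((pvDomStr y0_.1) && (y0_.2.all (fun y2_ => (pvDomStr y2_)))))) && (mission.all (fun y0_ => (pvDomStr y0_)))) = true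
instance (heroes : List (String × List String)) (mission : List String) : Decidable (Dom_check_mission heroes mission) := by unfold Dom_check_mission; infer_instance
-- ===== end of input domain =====

-- B replaces A's materialized itertools.product scan with a pruning backtracking
-- search returning the same first all-distinct assignment, without ever building
-- the cartesian product (objective: alternative).

-- ===== PORT A =====
-- inner loop: available_hero accumulated by appending hero[0] when stage ∈ hero[1]
def pvAvail (heroes : List (String × List String)) (stage : String) : List String :=
  heroes.foldl (fun acc hero => if stage ∈ hero.2 then acc ++ [hero.1] else acc) []

-- outer loop building hero_list; `none` = the early `return tuple([])`
def pvBuild (heroes : List (String × List String)) : List String → Option (List (List String))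
  | [] => some []
  | stage :: rest =>
    let av := pvAvail heroes stage
    if av.length ≠ 0 then (pvBuild heroes rest).map (av :: ·) else none

-- itertools.product(*hero_list), in itertools order (leftmost varies slowest)
def pvProduct : List (List String) → List (List String)
  | [] => [[]]
  | xs :: rest => xs.flatMap (fun x => (pvProduct rest).map (x :: ·))

-- the final `for combination in combinations: if len(set(..)) == len(mission): return`
def pvScan (n : Nat) : List (List String) → List String
  | [] => []
  | c :: rest => if (PySem.List.dedup c).length = n then c else pvScan n rest

def check_mission (heroes : List (String × List String)) (mission : List String) : List String :=
  match pvBuild heroes mission with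
  | none => []
  | some hero_list => pvScan mission.length (pvProduct hero_list)

-- ===== PORT B =====
-- stages = [[name for name, skills in heroes if stage in skills] for stage in mission]
def pvStages (heroes : List (String × List String)) (mission : List String) : List (List String) :=
  mission.map (fun stage => (heroes.filter (fun h => stage ∈ h.2)).map (·.1))

-- dfs: try each unused candidate of the current stage, recurse on the rest;
-- `used` is the set of heroes on the current path (Source B's mutable set, persistent here)
def pvDfs (used : List String) : List (List String) → Option (List String)
  | [] => some []
  | cs :: rest =>
    cs.findSome? (fun c =>
      if c ∈ used then none else (pvDfs (c :: used) rest).map (c :: ·))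

def check_mission_alt (heroes : List (String × List String)) (mission : List String) : List String :=
  (pvDfs [] (pvStages heroes mission)).getD []

-- ===== PRECONDITION & SPEC =====
def Spec_check_mission (heroes : List (String × List String)) (mission : List String) (out : List String) : Prop := out = check_mission_alt heroes mission
instance (heroes : List (String × List String)) (mission : List String) (out : List String) : Decidable (Spec_check_mission heroes mission out) := by unfold Spec_check_mission; infer_instance

-- ===== CLAIM (what is proved, stated in full; the proofs are below) =====
def Claim_equal_check_mission : Prop := ∀ (heroes : List (String × List String)) (mission : List String), Dom_check_mission heroes mission → Spec_check_mission heroes mission (check_mission heroes mission)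

-- ===== LEMMAS AND PROOFS =====

theorem pv_find?_congr_mem {α : Type} {l : List α} {f g : α → Bool}
    (h : ∀ x ∈ l, f x = g x) : l.find? f = l.find? g := by
  induction l with
  | nil => rfl
  | cons a t ih =>
    simp only [List.find?]
    rw [h a (List.mem_cons_self ..), ih (fun x hx => h x (List.mem_cons_of_mem _ hx))]

theorem pv_findSome?_congr {α β : Type} {l : List α} {f g : α → Option β}
    (h : ∀ x, f x = g x) : l.findSome? f = l.findSome? g := by
  induction l with
  | nil => rfl
  | cons a t ih => simp only [List.findSome?_cons, h a, ih]

theorem pv_find?_flatMap {α β : Type} (l : List α) (h : α → List β) (f : β → Bool) :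
    (l.flatMap h).find? f = l.findSome? (fun a => (h a).find? f) := by
  induction l with
  | nil => rfl
  | cons a t ih =>
    simp only [List.flatMap_cons, List.find?_append, List.findSome?_cons, ih]
    cases (h a).find? f <;> rfl

-- the backtracking search finds the first product element p with (used ++ p) duplicate-free
theorem pvDfs_eq_find (ls : List (List String)) : ∀ (used : List String), used.Nodup →
    pvDfs used ls = (pvProduct ls).find? (fun p => decide ((used ++ p).Nodup)) := by
  induction ls with
  | nil =>
    intro used hu
    simp [pvDfs, pvProduct, hu]
  | cons cs rest ih =>
    intro used hu
    simp only [pvDfs, pvProduct]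
    rw [pv_find?_flatMap]
    apply pv_findSome?_congr
    intro c
    rw [List.find?_map]
    by_cases hc : c ∈ used
    · have : ∀ p ∈ pvProduct rest,
          (decide ((used ++ c :: p).Nodup)) = false := by
        intro p _
        simp only [decide_eq_false_iff_not]
        intro hnd
        exact (List.disjoint_of_nodup_append hnd) hc (List.mem_cons_self ..)
      simp only [hc, if_true]
      rw [show ((fun p => decide ((used ++ p).Nodup)) ∘ (c :: ·))
            = (fun p => decide ((used ++ c :: p).Nodup)) from rfl]
      rw [pv_find?_congr_mem (g := fun _ => false) this]
      simp
    · have hperm : ∀ p : List String, (used ++ c :: p).Perm ((c :: used) ++ p) := by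
        intro p
        exact (List.perm_middle (a := c) (l₁ := used) (l₂ := p)).symm.symm
      simp only [hc, if_false]
      rw [ih (c :: used) (List.nodup_cons.mpr ⟨hc, hu⟩)]
      rw [show ((fun p => decide ((used ++ p).Nodup)) ∘ (c :: ·))
            = (fun p => decide ((used ++ c :: p).Nodup)) from rfl]
      have : ∀ p ∈ pvProduct rest,
          decide (((c :: used) ++ p).Nodup) = decide ((used ++ c :: p).Nodup) := by
        intro p _
        exact decide_eq_decide.mpr ((hperm p).nodup_iff).symm
      rw [pv_find?_congr_mem this]

theorem pvScan_eq_find (n : Nat) (l : List (List String)) :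
    pvScan n l = ((l.find? (fun c => decide ((PySem.List.dedup c).length = n))).getD []) := by
  induction l with
  | nil => rfl
  | cons c rest ih =>
    by_cases h : (PySem.List.dedup c).length = n <;>
      (simp only [PySem.List.dedup_eq_ofList] at h; simp [pvScan, List.find?, h, ih])

theorem pvAvail_eq (heroes : List (String × List String)) (stage : String) :
    pvAvail heroes stage = (heroes.filter (fun h => stage ∈ h.2)).map (·.1) := by
  simp [pvAvail]
  exact PySem.List.foldl_append_ite (l := heroes) (p := fun h => stage ∈ h.2)
      (f := fun h => h.1) (acc := ([] : List String))

theorem pvBuild_some (heroes : List (String × List String)) :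
    ∀ (mission : List String) (hl : List (List String)),
    pvBuild heroes mission = some hl →
    hl = pvStages heroes mission ∧ hl.length = mission.length := by
  intro mission
  induction mission with
  | nil => intro hl h; simp [pvBuild] at h; simp [pvStages, ← h]
  | cons s rest ih =>
    intro hl h
    simp only [pvBuild] at h
    split at h
    · cases htl : pvBuild heroes rest with
      | none => rw [htl] at h; simp at h
      | some tl =>
        rw [htl] at h
        simp only [Option.map_some, Option.some.injEq] at h
        obtain ⟨h1, h2⟩ := ih tl htl
        subst h
        simp [pvStages, pvAvail_eq, h2]
        simpa [pvStages] using h1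
    · simp at h

theorem pvBuild_none (heroes : List (String × List String)) :
    ∀ (mission : List String), pvBuild heroes mission = none →
    [] ∈ pvStages heroes mission := by
  intro mission
  induction mission with
  | nil => intro h; simp [pvBuild] at h
  | cons s rest ih =>
    intro h
    simp only [pvBuild] at h
    split at h
    · cases htl : pvBuild heroes rest with
      | none =>
        exact List.mem_cons_of_mem _ (ih htl)
      | some tl => rw [htl] at h; simp at h
    · rename_i hav
      simp only [ne_eq, not_not, List.length_eq_zero_iff] at hav
      have : (heroes.filter (fun h => s ∈ h.2)).map (·.1) = [] := by
        rw [← pvAvail_eq]; exact hav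
      simp [pvStages, this]

theorem pvProduct_of_mem_nil (ls : List (List String)) (h : [] ∈ ls) :
    pvProduct ls = [] := by
  induction ls with
  | nil => simp at h
  | cons cs rest ih =>
    rcases List.mem_cons.mp h with h1 | h2
    · subst h1; simp [pvProduct]
    · simp [pvProduct, ih h2]

theorem pvProduct_length (ls : List (List String)) :
    ∀ p ∈ pvProduct ls, p.length = ls.length := by
  induction ls with
  | nil => intro p hp; simp [pvProduct] at hp; simp [hp]
  | cons cs rest ih =>
    intro p hp
    simp only [pvProduct, List.mem_flatMap, List.mem_map] at hp
    obtain ⟨c, _, q, hq, rfl⟩ := hp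
    simp [ih q hq]

theorem pv_dedup_length_iff (c : List String) :
    ((PySem.List.dedup c).length = c.length ↔ c.Nodup) := by
  have h1 : (PySem.List.dedup c).length = c.toFinset.card := by
    rw [← List.toFinset_card_of_nodup (PySem.List.nodup_dedup c)]
    congr 1
    ext x; simp
  rw [h1, List.card_toFinset]
  constructor
  · intro h
    have he := (List.dedup_sublist c).eq_of_length h
    rw [← he]; exact c.nodup_dedup
  · intro h; rw [List.dedup_eq_self.mpr h]

-- ===== VERDICT (by name: the statement is the Claim_ definition above) =====
theorem check_mission_spec : Claim_equal_check_mission := by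
  intro heroes mission _
  unfold Spec_check_mission check_mission check_mission_alt
  cases hb : pvBuild heroes mission with
  | none =>
    dsimp only
    have hmem := pvBuild_none heroes mission hb
    rw [pvDfs_eq_find _ [] List.nodup_nil, pvProduct_of_mem_nil _ hmem]
    rfl
  | some hl =>
    dsimp only
    obtain ⟨hhl, hlen⟩ := pvBuild_some heroes mission hl hb
    rw [pvScan_eq_find, ← hhl, pvDfs_eq_find _ [] List.nodup_nil]
    congr 1
    apply pv_find?_congr_mem
    intro p hp
    have hplen : p.length = mission.length := by rw [pvProduct_length hl p hp, hlen]
    simp only [List.nil_append]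
    rw [← hplen]
    exact decide_eq_decide.mpr (pv_dedup_length_iff p)
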